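-- pv_equiv track=rewrite | github.com/odoma-ch/ssh-citation-index | test.py | count_json_sections
-- ===== SOURCE A (Python) =====
-- def count_json_sections(text: str) -> int:
--     """Count how many of the 15 expected sections are present"""
--     expected_sections = [
--         "company_overview", "financial_metrics", "market_analysis",
--         "strengths", "weaknesses", "opportunities", "threats",
--         "strategic_recommendations", "risk_assessment", "growth_projections",
--         "competitive_analysis", "technology_stack", "hr_analysis",
--         "marketing_strategy", "operational_efficiency"
--     ]
--
--     count = 0
--     for section in expected_sections:
--         if f'"{section}"' in text or f"'{section}'" in text:
--             count += 1
--     return count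
-- ===== SOURCE B (Python) =====
-- EXPECTED_SECTIONS = {
--     "company_overview", "financial_metrics", "market_analysis",
--     "strengths", "weaknesses", "opportunities", "threats",
--     "strategic_recommendations", "risk_assessment", "growth_projections",
--     "competitive_analysis", "technology_stack", "hr_analysis",
--     "marketing_strategy", "operational_efficiency"
-- }
--
--
-- def count_json_sections(text: str) -> int:
--     """Count how many of the 15 expected sections are present."""
--     # One pass per quote style: every token lying between two consecutive
--     # identical quotes is "present"; then count by set intersection.
--     found = set()
--     for q in ('"', "'"):
--         parts = text.split(q)
--         found.update(parts[1:-1])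
--     return len(EXPECTED_SECTIONS & found)
-- ===== Notes on version B (the rewrite author's own statement) =====
-- stated objective: alternative
-- what changed: Instead of searching the text for 15 quoted patterns one by one, B splits the text once per quote character, collects every token lying between two consecutive identical quotes into a set, and returns the size of that set's intersection with the expected-name set.
import Mathlib
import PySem

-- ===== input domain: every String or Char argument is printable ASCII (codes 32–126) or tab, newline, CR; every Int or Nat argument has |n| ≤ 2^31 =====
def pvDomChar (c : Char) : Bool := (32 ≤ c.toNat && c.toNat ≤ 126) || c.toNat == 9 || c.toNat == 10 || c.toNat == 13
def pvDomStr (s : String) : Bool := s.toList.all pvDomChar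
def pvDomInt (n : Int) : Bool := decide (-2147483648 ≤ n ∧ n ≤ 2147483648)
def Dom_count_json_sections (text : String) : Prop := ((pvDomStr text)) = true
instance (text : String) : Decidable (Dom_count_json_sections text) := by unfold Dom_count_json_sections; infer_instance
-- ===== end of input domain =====

-- B replaces 15 per-name substring searches of the text by one split per quote
-- character plus a set intersection (objective: alternative decomposition).

-- ===== PORT A =====
def pvExpectedSections : List String :=
  ["company_overview", "financial_metrics", "market_analysis",
   "strengths", "weaknesses", "opportunities", "threats",
   "strategic_recommendations", "risk_assessment", "growth_projections",
   "competitive_analysis", "technology_stack", "hr_analysis",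
   "marketing_strategy", "operational_efficiency"]

def count_json_sections (text : String) : Int :=
  pvExpectedSections.foldl
    (fun count sec =>
      if PySem.Str.isIn ("\"" ++ sec ++ "\"") text
          || PySem.Str.isIn ("'" ++ sec ++ "'") text
      then count + 1 else count) 0

-- ===== PORT B =====
-- the same 15 names, as the char lists B works on (Python: a module-level set literal)
def pvExpectedAlt : List (List Char) :=
  ["company_overview".toList, "financial_metrics".toList, "market_analysis".toList,
   "strengths".toList, "weaknesses".toList, "opportunities".toList, "threats".toList,
   "strategic_recommendations".toList, "risk_assessment".toList, "growth_projections".toList,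
   "competitive_analysis".toList, "technology_stack".toList, "hr_analysis".toList,
   "marketing_strategy".toList, "operational_efficiency".toList]

-- hand port of Python str.split(q) for a single separator char (exact: CPython keeps
-- empty segments and ''.split(q) = ['']); returns (first segment, remaining segments)
def pvSplitChar (q : Char) : List Char → List Char × List (List Char)
  | [] => ([], [])
  | c :: cs =>
    let r := pvSplitChar q cs
    if c = q then ([], r.1 :: r.2) else (c :: r.1, r.2)

-- found = the set of all tokens between two consecutive identical quotes (Python: the loop over ('"', "'"))
def pvFoundSet (text : String) : PySem.Set (List Char) :=
  (['"', '\''] : List Char).foldl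
    (fun found q =>
      let p := pvSplitChar q text.toList
      found.update (PySem.List.slice (p.1 :: p.2) (some 1) (some (-1))))
    PySem.Set.empty

def count_json_sections_alt (text : String) : Int :=
  (((PySem.Set.ofList pvExpectedAlt).inter (pvFoundSet text)).length : Int)

-- ===== PRECONDITION & SPEC =====
def Spec_count_json_sections (text : String) (out : Int) : Prop := out = count_json_sections_alt text
instance (text : String) (out : Int) : Decidable (Spec_count_json_sections text out) := by unfold Spec_count_json_sections; infer_instance

-- ===== CLAIM (what is proved, stated in full; the proofs are below) =====
def Claim_equal_count_json_sections : Prop := ∀ (text : String), Dom_count_json_sections text → Spec_count_json_sections text (count_json_sections text)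

-- ===== LEMMAS AND PROOFS =====

-- parts[1:-1] of a nonempty parts list
theorem pvSliceInner {α : Type} (h : α) (t : List α) :
    PySem.List.slice (h :: t) (some 1) (some (-1)) = t.dropLast := by
  simp [PySem.List.slice, PySem.List.clampIdx, List.dropLast_eq_take]
  split_ifs <;> omega

-- the segment before the first q is (pvSplitChar q cs).1; some q exists iff .2 ≠ []
theorem pvPrefixSplit (q : Char) (s cs : List Char) (hq : q ∉ s) :
    s ++ [q] <+: cs ↔ (pvSplitChar q cs).2 ≠ [] ∧ (pvSplitChar q cs).1 = s := by
  induction cs generalizing s with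
  | nil => simp [pvSplitChar]
  | cons c cs ih =>
      by_cases hc : c = q
      · subst hc
        cases s with
        | nil => simp [pvSplitChar]
        | cons a s' =>
            have ha : a ≠ c := fun h => hq (h ▸ List.mem_cons_self)
            simp [pvSplitChar, List.cons_prefix_cons]
            exact fun h => absurd h ha
      · cases s with
        | nil =>
            simp [pvSplitChar, hc]
            exact fun h => hc h.symm
        | cons a s' =>
            have hq' : q ∉ s' := fun h => hq (List.mem_cons_of_mem _ h)
            simp only [pvSplitChar, if_neg hc, List.cons_append, List.cons_prefix_cons,
              ih s' hq', List.cons_eq_cons]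
            constructor
            · rintro ⟨rfl, h2, rfl⟩; exact ⟨h2, rfl, rfl⟩
            · rintro ⟨h2, rfl, rfl⟩; exact ⟨rfl, h2, rfl⟩

-- a token lies strictly between two consecutive q's iff q::s++[q] is a substring
theorem pvInnerSplit (q : Char) (s cs : List Char) (hq : q ∉ s) :
    s ∈ ((pvSplitChar q cs).2).dropLast ↔ (q :: (s ++ [q])) <:+: cs := by
  induction cs with
  | nil => simp [pvSplitChar]
  | cons c cs ih =>
      by_cases hc : c = q
      · subst hc
        rw [List.infix_cons_iff, List.cons_prefix_cons]
        simp only [pvSplitChar]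
        rcases h2 : (pvSplitChar c cs).2 with _ | ⟨x, xs⟩
        · rw [← ih]
          simp [h2, pvPrefixSplit c s cs hq]
        · rw [← ih]
          simp only [pvPrefixSplit c s cs hq, h2]
          simp [eq_comm]
      · rw [List.infix_cons_iff]
        have hpre : ¬ (q :: (s ++ [q])) <+: c :: cs := by
          rw [List.cons_prefix_cons]; rintro ⟨rfl, -⟩; exact hc rfl
        simp only [pvSplitChar, if_neg hc, hpre, false_or]
        exact ih

-- membership in B's found-set: an inner token of one of the two splits
theorem pvMemFound (text : String) (s : List Char) :
    s ∈ pvFoundSet text ↔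
      s ∈ ((pvSplitChar '"' text.toList).2).dropLast ∨
      s ∈ ((pvSplitChar '\'' text.toList).2).dropLast := by
  simp [pvFoundSet, List.foldl, pvSliceInner, PySem.Set.mem_update, PySem.Set.empty]

-- a counting foldl is the length of a filter
theorem pvFoldlCount {α : Type} (p : α → Bool) (l : List α) (c : Int) :
    l.foldl (fun c n => if p n then c + 1 else c) c = c + ((l.filter p).length : Int) := by
  induction l generalizing c with
  | nil => simp
  | cons a l ih =>
      by_cases h : p a
      · simp [List.foldl_cons, ih, h]; ring
      · simp [List.foldl_cons, ih, h]

theorem pvMain (text : String) : count_json_sections text = count_json_sections_alt text := by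
  unfold count_json_sections count_json_sections_alt
  rw [pvFoldlCount]
  rw [show PySem.Set.ofList pvExpectedAlt = pvExpectedAlt from by decide]
  rw [show pvExpectedAlt = pvExpectedSections.map String.toList from rfl]
  unfold PySem.Set.inter
  rw [List.filter_map, List.length_map, Int.zero_add]
  congr 1
  apply congrArg List.length
  apply List.filter_congr
  intro n hn
  have hq : '"' ∉ n.toList ∧ '\'' ∉ n.toList := by
    revert hn; revert n; decide
  rw [Bool.eq_iff_iff]
  simp only [Bool.or_eq_true, PySem.Str.isIn_eq, PySem.Chars.isIn_iff_infix,
    Function.comp_apply, PySem.Set.contains_iff, pvMemFound,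
    pvInnerSplit '"' n.toList text.toList hq.1, pvInnerSplit '\'' n.toList text.toList hq.2]
  have h1 : ("\"" ++ n ++ "\"").toList = '"' :: (n.toList ++ ['"']) := by simp
  have h2 : ("'" ++ n ++ "'").toList = '\'' :: (n.toList ++ ['\'']) := by simp
  rw [h1, h2]

-- ===== VERDICT (by name: the statement is the Claim_ definition above) =====
theorem count_json_sections_spec : Claim_equal_count_json_sections := by
  intro text _
  exact pvMain text
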